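-- pv_equiv track=rewrite | github.com/Razor-87/hackerrank | python/easy/alphabet_rangoli.py | alphabet_rangoli
-- ===== SOURCE A (Python) =====
-- from typing import List
--
-- def alphabet_rangoli(size: int) -> List[str]:
--     """
--     >>> alphabet_rangoli(5)
--     ['--------e--------', '------e-d-e------', '----e-d-c-d-e----', '--e-d-c-b-c-d-e--', 'e-d-c-b-a-b-c-d-e', '--e-d-c-b-c-d-e--', '----e-d-c-d-e----', '------e-d-e------', '--------e--------']
--     """
--     from string import ascii_lowercase
--     alpha = list(ascii_lowercase)
--     lst = []
--     for i in range(size):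
--         s = '-'.join(alpha[i:size])
--         lst.append((s[::-1]+s[1:]).center(4*size-3, '-'))
--     return lst[:0:-1]+lst
-- ===== SOURCE B (Python) =====
-- from typing import List
--
-- def alphabet_rangoli(size: int) -> List[str]:
--     from string import ascii_lowercase as alpha
--     width = 4 * size - 3
--     top = min(size, 26)  # the alphabet runs out after 'z'
--     rows = []
--     for r in range(2 * size - 1):
--         start = abs(size - 1 - r)
--         letters = [alpha[j] for j in range(top - 1, start, -1)] + \
--                   [alpha[j] for j in range(start, top)]
--         rows.append('-'.join(letters).center(width, '-'))
--     return rows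
-- ===== Notes on version B (the rewrite author's own statement) =====
-- stated objective: alternative
-- what changed: B makes a single pass over all output rows, computing each row's starting letter index from the row number and assembling the symmetric letter sequence directly, instead of A's building the top half with a string-reversal trick and then mirroring the list of rows.
import Mathlib
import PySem

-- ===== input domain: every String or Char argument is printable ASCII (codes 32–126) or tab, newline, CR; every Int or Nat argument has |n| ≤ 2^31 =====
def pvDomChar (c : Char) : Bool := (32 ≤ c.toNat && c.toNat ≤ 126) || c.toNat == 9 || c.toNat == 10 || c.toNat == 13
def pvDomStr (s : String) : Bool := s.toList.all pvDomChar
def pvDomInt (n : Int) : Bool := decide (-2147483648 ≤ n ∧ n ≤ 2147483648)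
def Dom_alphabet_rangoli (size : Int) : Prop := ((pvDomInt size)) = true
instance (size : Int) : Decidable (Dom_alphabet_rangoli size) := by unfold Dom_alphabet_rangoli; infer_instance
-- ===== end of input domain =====

-- B replaces A's build-top-half-then-mirror (lst[:0:-1]+lst and the s[::-1]+s[1:] string trick)
-- by one pass over all 2*size-1 output rows, assembling each row's letter sequence directly; objective: alternative.

-- list(ascii_lowercase)
def pyAlpha : List Char :=
  ['a','b','c','d','e','f','g','h','i','j','k','l','m','n','o','p','q','r','s','t','u','v','w','x','y','z']

-- hand port of CPython's str.center(width, fill) (PySem has no center); exact: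
-- returns s unchanged when width <= len(s), else marg = width - len(s),
-- left = marg // 2 + (marg & width & 1) fill chars on the left, the rest on the right.
def pyCenter (cs : List Char) (w : Int) (fill : Char) : List Char :=
  if w ≤ (cs.length : Int) then cs
  else
    let marg : Nat := w.toNat - cs.length
    let left : Nat := marg / 2 + (marg &&& w.toNat &&& 1)
    List.replicate left fill ++ cs ++ List.replicate (marg - left) fill

-- ===== PORT A =====
def alphabet_rangoli (size : Int) : List String :=
  let alpha := pyAlpha
  let lst := (PySem.List.pyRange 0 size).foldl (fun lst i =>
    -- s = '-'.join(alpha[i:size])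
    let s := PySem.Chars.join ['-'] ((PySem.List.slice alpha (some i) (some size)).map (fun c => [c]))
    -- lst.append((s[::-1] + s[1:]).center(4*size-3, '-'))
    lst ++ [String.ofList (pyCenter ((PySem.List.slice? s none none (-1)).getD [] ++
                                 PySem.List.slice s (some 1) none) (4 * size - 3) '-')]) []
  -- return lst[:0:-1] + lst
  (PySem.List.slice? lst none (some 0) (-1)).getD [] ++ lst

-- ===== PORT B =====
def alphabet_rangoli_alt (size : Int) : List String :=
  let alpha := pyAlpha
  let width := 4 * size - 3
  let top := min size 26
  (PySem.List.pyRange 0 (2 * size - 1)).foldl (fun rows r =>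
    let start := |size - 1 - r|
    -- every generated index j lies in [0, 26), so Python's alpha[j] never raises; pyGetD is exact here
    let letters := (PySem.List.pyRange (top - 1) start (-1)).map (fun j => PySem.List.pyGetD alpha j 'a') ++
                   (PySem.List.pyRange start top).map (fun j => PySem.List.pyGetD alpha j 'a')
    rows ++ [String.ofList (pyCenter (PySem.Chars.join ['-'] (letters.map (fun c => [c]))) width '-')]) []

-- ===== PRECONDITION & SPEC =====
def Spec_alphabet_rangoli (size : Int) (out : List String) : Prop := out = alphabet_rangoli_alt size
instance (size : Int) (out : List String) : Decidable (Spec_alphabet_rangoli size out) := by unfold Spec_alphabet_rangoli; infer_instance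

-- ===== CLAIM (what is proved, stated in full; the proofs are below) =====
def Claim_equal_alphabet_rangoli : Prop := ∀ (size : Int), Dom_alphabet_rangoli size → Spec_alphabet_rangoli size (alphabet_rangoli size)

-- ===== LEMMAS AND PROOFS =====

-- the letters alpha[i:size] of a row (clipped at 'z'); common to both row characterisations
def rangLetters (size i : Int) : List Char := (pyAlpha.drop i.toNat).take ((min size 26).toNat - i.toNat)

-- '-'.join of a list of letters
def rangJ (l : List Char) : List Char := PySem.Chars.join ['-'] (l.map (fun c => [c]))

-- the common row value
def rangRow (size i : Int) : String :=
  String.ofList (pyCenter (rangJ ((rangLetters size i).tail.reverse ++ rangLetters size i)) (4 * size - 3) '-')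

theorem rangJ_cons (a : Char) (t : List Char) (h : t ≠ []) : rangJ (a :: t) = a :: '-' :: rangJ t := by
  cases t with
  | nil => exact absurd rfl h
  | cons b t' => simp [rangJ, PySem.Chars.join_cons_cons]

theorem rangJ_append (l1 l2 : List Char) (h1 : l1 ≠ []) (h2 : l2 ≠ []) :
    rangJ (l1 ++ l2) = rangJ l1 ++ '-' :: rangJ l2 := by
  induction l1 with
  | nil => exact absurd rfl h1
  | cons a t ih =>
    cases t with
    | nil =>
      cases l2 with
      | nil => exact absurd rfl h2
      | cons b t2 => simp [rangJ, PySem.Chars.join_cons_cons, PySem.Chars.join_singleton]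
    | cons b t' =>
      rw [List.cons_append, rangJ_cons a (b :: t' ++ l2) (by simp), ih (by simp),
        rangJ_cons a (b :: t') (by simp)]
      simp

theorem rangJ_reverse (l : List Char) : (rangJ l).reverse = rangJ l.reverse := by
  induction l with
  | nil => simp [rangJ, PySem.Chars.join_nil]
  | cons a t ih =>
    cases t with
    | nil => simp [rangJ, PySem.Chars.join_singleton]
    | cons b t' =>
      rw [rangJ_cons a (b :: t') (by simp),
        show (a :: b :: t').reverse = (b :: t').reverse ++ [a] from by simp,
        rangJ_append (b :: t').reverse [a] (by simp) (by simp), ← ih]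
      simp [rangJ, PySem.Chars.join_singleton]

theorem rangJ_mirror (l : List Char) :
    (rangJ l).reverse ++ (rangJ l).drop 1 = rangJ (l.tail.reverse ++ l) := by
  cases l with
  | nil => simp [rangJ, PySem.Chars.join_nil]
  | cons a t =>
    cases t with
    | nil => simp [rangJ, PySem.Chars.join_singleton]
    | cons b t' =>
      rw [show (a :: b :: t').tail = b :: t' from rfl,
        rangJ_append (b :: t').reverse (a :: b :: t') (by simp) (by simp),
        rangJ_cons a (b :: t') (by simp), ← rangJ_reverse]
      simp

theorem map_getD_range (a b : Int) (h0 : 0 ≤ a) (hb : b ≤ 26) :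
    (PySem.List.pyRange a b).map (fun j => PySem.List.pyGetD pyAlpha j 'a')
      = (pyAlpha.drop a.toNat).take (b - a).toNat := by
  by_cases hab : b ≤ a
  · rw [PySem.List.pyRange_one_eq_nil hab]
    have : (b - a).toNat = 0 := by omega
    simp [this]
  · push Not at hab
    have hlen : pyAlpha.length = 26 := by decide
    have key : ∀ n (a : Int), 0 ≤ a → (b - a).toNat = n →
        (PySem.List.pyRange a b).map (fun j => PySem.List.pyGetD pyAlpha j 'a')
          = (pyAlpha.drop a.toNat).take (b - a).toNat := by
      intro n
      induction n with
      | zero => intro a ha hn; rw [PySem.List.pyRange_one_eq_nil (by omega)]; simp [hn]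
      | succ m ih =>
        intro a ha hn
        have hab' : a < b := by omega
        have halt : a.toNat < pyAlpha.length := by rw [hlen]; omega
        rw [PySem.List.pyRange_one_cons hab', List.map_cons,
          ih (a + 1) (by omega) (by omega),
          List.drop_eq_getElem_cons halt]
        have h1 : (a+1).toNat = a.toNat + 1 := by omega
        have h2 : (b - a).toNat = (b - (a+1)).toNat + 1 := by omega
        rw [h1, h2, List.take_succ_cons]
        congr 1
        have := PySem.List.pyGetD_eq_getElem (xs := pyAlpha) (i := a) (d := 'a') (by omega) (by omega)
        simpa using this
    exact key (b - a).toNat a h0 rfl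

theorem slice?_rev_drop {α : Type} (xs : List α) :
    PySem.List.slice? xs none (some 0) (-1) = some ((xs.drop 1).reverse) := by
  cases xs with
  | nil => simp [PySem.List.slice?, PySem.List.sliceIndices]
  | cons x t =>
    simp only [PySem.List.slice?, PySem.List.sliceIndices]
    norm_num
    rw [show (if 0 < t.length then t.length else 0) = t.length from by split_ifs <;> omega]
    apply List.ext_getElem?
    intro i
    by_cases hi : i < t.length
    · rw [List.getElem?_map, List.getElem?_range hi,
        List.getElem?_reverse hi, Option.map_some]
      have hidx : ((t.length : Int) + -(i : Int)).toNat = (t.length - 1 - i) + 1 := by omega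
      rw [List.getElem?_eq_getElem (show t.length - 1 - i < t.length from by omega)]
      congr 1
      rw [getElem_congr_idx hidx, List.getElem_cons_succ]
    · rw [List.getElem?_eq_none (by simpa using hi), List.getElem?_eq_none (by simp; omega)]

theorem slice_alpha_eq (size i : Int) (h0 : 0 ≤ i) (hi : i < size) :
    PySem.List.slice pyAlpha (some i) (some size) = rangLetters size i := by
  rw [PySem.List.slice_toNat pyAlpha h0 (by omega), rangLetters]
  by_cases h26 : size ≤ 26
  · rw [show (min size 26) = size from by omega]
  · rw [List.take_of_length_le (by simp [pyAlpha]; omega),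
      List.take_of_length_le (by simp [pyAlpha]; omega)]

theorem rowA_eq (size i : Int) (h0 : 0 ≤ i) (hi : i < size) :
    String.ofList (pyCenter ((PySem.List.slice?
        (PySem.Chars.join ['-'] ((PySem.List.slice pyAlpha (some i) (some size)).map (fun c => [c])))
        none none (-1)).getD [] ++
      PySem.List.slice
        (PySem.Chars.join ['-'] ((PySem.List.slice pyAlpha (some i) (some size)).map (fun c => [c])))
        (some 1) none) (4 * size - 3) '-') = rangRow size i := by
  rw [slice_alpha_eq size i h0 hi]
  rw [show PySem.Chars.join ['-'] ((rangLetters size i).map (fun c => [c])) = rangJ (rangLetters size i) from rfl]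
  rw [PySem.List.slice?_none_none_neg_one, Option.getD_some, PySem.List.slice_from_one,
    ← List.drop_one, rangJ_mirror, rangRow]

theorem rowB_eq (size i : Int) (h0 : 0 ≤ i) :
    String.ofList (pyCenter (PySem.Chars.join ['-']
      (((PySem.List.pyRange (min size 26 - 1) i (-1)).map (fun j => PySem.List.pyGetD pyAlpha j 'a') ++
        (PySem.List.pyRange i (min size 26)).map (fun j => PySem.List.pyGetD pyAlpha j 'a')).map (fun c => [c])))
      (4 * size - 3) '-') = rangRow size i := by
  have htop : min size 26 ≤ 26 := by omega
  have h2 : (PySem.List.pyRange i (min size 26)).map (fun j => PySem.List.pyGetD pyAlpha j 'a')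
      = rangLetters size i := by
    rw [map_getD_range i (min size 26) h0 htop, rangLetters]
    congr 1
    omega
  have h1 : (PySem.List.pyRange (min size 26 - 1) i (-1)).map (fun j => PySem.List.pyGetD pyAlpha j 'a')
      = (rangLetters size i).tail.reverse := by
    rw [show (min size 26 - 1 : Int) = min size 26 - 1 from rfl]
    rw [PySem.List.pyRange_neg_one_eq_reverse, show (min size 26 - 1 + 1 : Int) = min size 26 from by ring,
      List.map_reverse, map_getD_range (i+1) (min size 26) (by omega) htop]
    congr 1
    rw [rangLetters, ← List.drop_one, List.drop_take, List.drop_drop]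
    congr 1
    · omega
    · congr 1
      omega
  rw [h1, h2, rangRow]
  rfl

-- ===== VERDICT (by name: the statement is the Claim_ definition above) =====
theorem alphabet_rangoli_spec : Claim_equal_alphabet_rangoli := by
  intro size _
  unfold Spec_alphabet_rangoli alphabet_rangoli alphabet_rangoli_alt
  simp only []
  rw [PySem.List.foldl_append_singleton_eq_map, PySem.List.foldl_append_singleton_eq_map,
    slice?_rev_drop, Option.getD_some, List.nil_append, List.nil_append]
  by_cases hsz : size ≤ 0
  · rw [PySem.List.pyRange_one_eq_nil (by omega), PySem.List.pyRange_one_eq_nil (by omega)]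
    simp
  · push Not at hsz
    have hA := List.map_congr_left (l := PySem.List.pyRange 0 size)
      (f := fun i => String.ofList
                (pyCenter
                  ((PySem.List.slice?
                          (PySem.Chars.join ['-']
                            (List.map (fun c => [c]) (PySem.List.slice pyAlpha (some i) (some size))))
                          none none (-1)).getD
                      [] ++
                    PySem.List.slice
                      (PySem.Chars.join ['-'] (List.map (fun c => [c]) (PySem.List.slice pyAlpha (some i) (some size))))
                      (some 1))
                  (4 * size - 3) '-'))
      (g := fun i => rangRow size i)
      (fun i hm => by
        have hmem := (PySem.List.mem_pyRange_one).mp hm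
        exact rowA_eq size i hmem.1 hmem.2)
    rw [hA]
    have hB := List.map_congr_left (l := PySem.List.pyRange 0 (2 * size - 1))
      (f := fun r => String.ofList
            (pyCenter
              (PySem.Chars.join ['-']
                (List.map (fun c => [c])
                  (List.map (fun j => PySem.List.pyGetD pyAlpha j 'a')
                      (PySem.List.pyRange (min size 26 - 1) |size - 1 - r| (-1)) ++
                    List.map (fun j => PySem.List.pyGetD pyAlpha j 'a')
                      (PySem.List.pyRange |size - 1 - r| (min size 26)))))
              (4 * size - 3) '-'))
      (g := fun r => rangRow size |size - 1 - r|)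
      (fun r hm => rowB_eq size |size - 1 - r| (abs_nonneg _))
    rw [hB]
    rw [PySem.List.pyRange_one_append 0 (size - 1) (2 * size - 1) (by omega) (by omega), List.map_append]
    have hdrop : (List.map (rangRow size) (PySem.List.pyRange 0 size)).drop 1
        = List.map (rangRow size) (PySem.List.pyRange 1 size) := by
      rw [PySem.List.pyRange_one_cons (by omega : (0:Int) < size), List.map_cons, List.drop_one, List.tail_cons]
      norm_num
    rw [hdrop]
    congr 1
    · rw [← List.map_reverse, ← show PySem.List.pyRange (size - 1) 0 (-1) = (PySem.List.pyRange 1 size).reverse from by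
        rw [PySem.List.pyRange_neg_one_eq_reverse (size - 1) 0]; norm_num]
      rw [PySem.List.pyRange_neg_one (size - 1) 0, PySem.List.pyRange_one 0 (size - 1),
        List.map_map, List.map_map]
      refine List.map_congr_left (fun k hk => ?_)
      have hk' := List.mem_range.mp hk
      simp only [Function.comp_apply]
      congr 1
      rw [abs_of_nonneg (by omega)]
      omega
    · rw [PySem.List.pyRange_one (size - 1) (2 * size - 1), PySem.List.pyRange_one 0 size,
        show (2 * size - 1 - (size - 1) : Int) = size - 0 from by ring, List.map_map, List.map_map]
      refine List.map_congr_left (fun k hk => ?_)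
      simp only [Function.comp_apply]
      congr 1
      rw [abs_of_nonpos (by omega)]
      omega
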